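-- pv_equiv track=rewrite | github.com/jconnelly/micro-agent-development | Agents/LegacyRuleExtractionAndTranslatorAgent.py | _find_smart_boundary
-- ===== SOURCE A (Python) =====
-- from typing import Dict, Any, List, Optional
--
-- def _find_smart_boundary(lines: List[str], target_pos: int, search_window: int = 10) -> int:
--     """
--     Find natural breaking points near target position to avoid splitting rules/logical blocks.
--     """
--     if target_pos >= len(lines):
--         return len(lines)
--
--     # Prefer these boundaries (in order of preference)
--     boundary_patterns = [
--         lambda line: line.strip() == '',  # Empty lines (highest preference)
--         lambda line: line.strip().startswith(';;') or line.strip().startswith('#'),  # Comments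
--         lambda line: line.strip().startswith('//') or line.strip().startswith('/*'),  # C-style comments
--         lambda line: line.strip().endswith('}') or line.strip().endswith('});'),  # Code block ends
--         lambda line: line.strip().startswith('(defrule'),  # CLIPS rules
--         lambda line: line.strip().startswith('rule '),  # Drools rules
--         lambda line: line.strip().startswith('function ') or line.strip().startswith('def '),  # Functions
--         lambda line: line.strip().startswith('<') and '>' in line,  # XML tags
--         lambda line: line.strip().endswith(';'),  # Statement ends
--     ]
--
--     # Search within window for best boundary
--     for pattern in boundary_patterns:
--         for offset in range(-search_window, search_window + 1):
--             pos = target_pos + offset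
--             if 0 <= pos < len(lines) and pattern(lines[pos]):
--                 return pos + 1 if pos + 1 <= len(lines) else len(lines)
--
--     return target_pos  # Fall back to original position
-- ===== SOURCE B (Python) =====
-- from typing import List, Optional
--
-- # One check per boundary kind, applied to the pre-stripped line (raw line kept
-- # for the '>' containment test, which Python A applies to the raw line).
-- _BOUNDARY_CHECKS = [
--     lambda s, line: s == '',
--     lambda s, line: s.startswith(';;') or s.startswith('#'),
--     lambda s, line: s.startswith('//') or s.startswith('/*'),
--     lambda s, line: s.endswith('}') or s.endswith('});'),
--     lambda s, line: s.startswith('(defrule'),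
--     lambda s, line: s.startswith('rule '),
--     lambda s, line: s.startswith('function ') or s.startswith('def '),
--     lambda s, line: s.startswith('<') and '>' in line,
--     lambda s, line: s.endswith(';'),
-- ]
--
--
-- def _match_index(line: str) -> Optional[int]:
--     """Lowest boundary-pattern index the line matches, stripping it once."""
--     s = line.strip()
--     for i, check in enumerate(_BOUNDARY_CHECKS):
--         if check(s, line):
--             return i
--     return None
--
--
-- def _find_smart_boundary(lines: List[str], target_pos: int, search_window: int = 10) -> int:
--     n = len(lines)
--     if target_pos >= n:
--         return n
--     best = None  # (pattern_index, pos); replaced only on a strictly smaller index,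
--                  # so among equal indices the earliest offset wins, as in A.
--     for offset in range(-search_window, search_window + 1):
--         pos = target_pos + offset
--         if 0 <= pos < n:
--             k = _match_index(lines[pos])
--             if k is not None and (best is None or k < best[0]):
--                 best = (k, pos)
--     return best[1] + 1 if best is not None else target_pos
-- ===== Notes on version B (the rewrite author's own statement) =====
-- stated objective: alternative
-- what changed: Replaces A's pattern-outer nested scan (nine window passes, re-stripping each line per pattern) by a single pass over the window that strips each line once, computes its lowest matching pattern index, and keeps the candidate with the strictly smallest index (earliest offset on ties).
import Mathlib
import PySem

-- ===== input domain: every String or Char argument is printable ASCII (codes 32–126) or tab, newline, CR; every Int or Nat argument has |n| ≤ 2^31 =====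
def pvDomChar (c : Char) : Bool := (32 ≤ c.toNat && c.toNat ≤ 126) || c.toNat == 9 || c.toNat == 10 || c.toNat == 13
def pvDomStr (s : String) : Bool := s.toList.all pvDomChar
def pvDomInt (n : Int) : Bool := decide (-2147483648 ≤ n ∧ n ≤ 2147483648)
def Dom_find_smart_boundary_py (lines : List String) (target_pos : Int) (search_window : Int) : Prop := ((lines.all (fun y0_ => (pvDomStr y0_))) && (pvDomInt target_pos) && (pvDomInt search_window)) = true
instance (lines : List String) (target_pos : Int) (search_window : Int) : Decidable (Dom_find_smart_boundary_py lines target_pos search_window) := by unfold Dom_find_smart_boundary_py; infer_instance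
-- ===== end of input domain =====

-- B replaces A's pattern-outer nested scan by a single window pass that strips each
-- line once, computes its lowest matching pattern index, and keeps the strictly
-- smallest index (earliest offset on ties); same return value, no speed claim.

-- ===== PORT A =====
def pvPatternsA : List (String → Bool) :=
  [ fun line => PySem.Str.strip line == ""
  , fun line => PySem.Str.startswith (PySem.Str.strip line) ";;" || PySem.Str.startswith (PySem.Str.strip line) "#"
  , fun line => PySem.Str.startswith (PySem.Str.strip line) "//" || PySem.Str.startswith (PySem.Str.strip line) "/*"
  , fun line => PySem.Str.endswith (PySem.Str.strip line) "}" || PySem.Str.endswith (PySem.Str.strip line) "});"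
  , fun line => PySem.Str.startswith (PySem.Str.strip line) "(defrule"
  , fun line => PySem.Str.startswith (PySem.Str.strip line) "rule "
  , fun line => PySem.Str.startswith (PySem.Str.strip line) "function " || PySem.Str.startswith (PySem.Str.strip line) "def "
  , fun line => PySem.Str.startswith (PySem.Str.strip line) "<" && PySem.Str.isIn ">" line
  , fun line => PySem.Str.endswith (PySem.Str.strip line) ";" ]

-- inner 'for offset in range(...)' loop of A (early return on first match)
def pvLoopA2 (lines : List String) (target_pos : Int) (pat : String → Bool) : List Int → Option Int
  | [] => none
  | o :: rest =>
    if decide (0 ≤ target_pos + o) && decide (target_pos + o < (lines.length : Int))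
        && pat (PySem.List.pyGetD lines (target_pos + o) "") then
      some (if target_pos + o + 1 ≤ (lines.length : Int) then target_pos + o + 1 else (lines.length : Int))
    else pvLoopA2 lines target_pos pat rest

-- outer 'for pattern in boundary_patterns' loop of A
def pvLoopA1 (lines : List String) (target_pos : Int) (offs : List Int) : List (String → Bool) → Option Int
  | [] => none
  | p :: ps =>
    match pvLoopA2 lines target_pos p offs with
    | some r => some r
    | none => pvLoopA1 lines target_pos offs ps

def find_smart_boundary_py (lines : List String) (target_pos : Int) (search_window : Int) : Int :=
  if (lines.length : Int) ≤ target_pos then (lines.length : Int)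
  else
    match pvLoopA1 lines target_pos (PySem.List.pyRange (-search_window) (search_window + 1) 1) pvPatternsA with
    | some r => r
    | none => target_pos

-- ===== PORT B =====
-- the same nine checks, on the pre-stripped line s (raw line kept for the '>' test)
def pvChecksB : List (String → String → Bool) :=
  [ fun s _ => s == ""
  , fun s _ => PySem.Str.startswith s ";;" || PySem.Str.startswith s "#"
  , fun s _ => PySem.Str.startswith s "//" || PySem.Str.startswith s "/*"
  , fun s _ => PySem.Str.endswith s "}" || PySem.Str.endswith s "});"
  , fun s _ => PySem.Str.startswith s "(defrule"
  , fun s _ => PySem.Str.startswith s "rule "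
  , fun s _ => PySem.Str.startswith s "function " || PySem.Str.startswith s "def "
  , fun s line => PySem.Str.startswith s "<" && PySem.Str.isIn ">" line
  , fun s _ => PySem.Str.endswith s ";" ]

-- 'for i, check in enumerate(_BOUNDARY_CHECKS)' of B's _match_index
def pvMatchIdxAux (line s : String) (i : Nat) : List (String → String → Bool) → Option Nat
  | [] => none
  | c :: cs => if c s line then some i else pvMatchIdxAux line s (i + 1) cs

def pvMatchIdx (line : String) : Option Nat :=
  pvMatchIdxAux line (PySem.Str.strip line) 0 pvChecksB

-- body of B's single window loop: keep best on strictly smaller pattern index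
def pvStepB (lines : List String) (target_pos : Int) (best : Option (Nat × Int)) (o : Int) : Option (Nat × Int) :=
  if 0 ≤ target_pos + o ∧ target_pos + o < (lines.length : Int) then
    match pvMatchIdx (PySem.List.pyGetD lines (target_pos + o) "") with
    | some k =>
      match best with
      | none => some (k, target_pos + o)
      | some (bk, bp) => if k < bk then some (k, target_pos + o) else some (bk, bp)
    | none => best
  else best

def find_smart_boundary_py_alt (lines : List String) (target_pos : Int) (search_window : Int) : Int :=
  if (lines.length : Int) ≤ target_pos then (lines.length : Int)
  else
    match (PySem.List.pyRange (-search_window) (search_window + 1) 1).foldl (pvStepB lines target_pos) none with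
    | some (_, pos) => pos + 1
    | none => target_pos

-- ===== PRECONDITION & SPEC =====
def Spec_find_smart_boundary_py (lines : List String) (target_pos : Int) (search_window : Int) (out : Int) : Prop := out = find_smart_boundary_py_alt lines target_pos search_window
instance (lines : List String) (target_pos : Int) (search_window : Int) (out : Int) : Decidable (Spec_find_smart_boundary_py lines target_pos search_window out) := by unfold Spec_find_smart_boundary_py; infer_instance

-- ===== CLAIM (what is proved, stated in full; the proofs are below) =====
def Claim_equal_find_smart_boundary_py : Prop := ∀ (lines : List String) (target_pos : Int) (search_window : Int), Dom_find_smart_boundary_py lines target_pos search_window → Spec_find_smart_boundary_py lines target_pos search_window (find_smart_boundary_py lines target_pos search_window)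

-- ===== LEMMAS AND PROOFS =====

-- abstract step of B's fold, over absolute positions, candidate function h
def pvGStep (h : Int → Option Nat) (b : Option (Nat × Int)) (p : Int) : Option (Nat × Int) :=
  match h p with
  | some k =>
    match b with
    | none => some (k, p)
    | some (bk, bp) => if k < bk then some (k, p) else some (bk, bp)
  | none => b

-- candidate function: lowest index ≥ i of a check in cs matching position p
def pvHAux (lines : List String) (i : Nat) (cs : List (String → String → Bool)) (p : Int) : Option Nat :=
  if 0 ≤ p ∧ p < (lines.length : Int) then
    pvMatchIdxAux (PySem.List.pyGetD lines p "") (PySem.Str.strip (PySem.List.pyGetD lines p "")) i cs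
  else none

theorem pvStepB_eq (lines : List String) (t : Int) (b : Option (Nat × Int)) (o : Int) :
    pvStepB lines t b o = pvGStep (pvHAux lines 0 pvChecksB) b (t + o) := by
  unfold pvStepB pvGStep pvHAux pvMatchIdx
  by_cases hv : 0 ≤ t + o ∧ t + o < (lines.length : Int)
  · simp only [if_pos hv]
  · simp only [if_neg hv]

theorem pvFoldB_eq (lines : List String) (t : Int) (offs : List Int) (b : Option (Nat × Int)) :
    offs.foldl (pvStepB lines t) b
      = (offs.map (t + ·)).foldl (pvGStep (pvHAux lines 0 pvChecksB)) b := by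
  rw [List.foldl_map]
  have : (fun (b : Option (Nat × Int)) (o : Int) => pvGStep (pvHAux lines 0 pvChecksB) b (t + o))
      = pvStepB lines t := by
    funext b o; exact (pvStepB_eq lines t b o).symm
  rw [this]

theorem pvMatchIdxAux_le (line s : String) (cs : List (String → String → Bool)) :
    ∀ (i k : Nat), pvMatchIdxAux line s i cs = some k → i ≤ k := by
  induction cs with
  | nil => intro i k h; simp [pvMatchIdxAux] at h
  | cons c cs ih =>
    intro i k h
    by_cases hc : c s line
    · simp [pvMatchIdxAux, hc] at h; omega
    · simp only [pvMatchIdxAux, hc, Bool.false_eq_true, if_false] at h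
      have := ih (i + 1) k h; omega

theorem pvHAux_le (lines : List String) (i : Nat) (cs : List (String → String → Bool)) (p : Int) (k : Nat)
    (h : pvHAux lines i cs p = some k) : i ≤ k := by
  unfold pvHAux at h
  split at h
  · exact pvMatchIdxAux_le _ _ _ _ _ h
  · simp at h

theorem pvHAux_valid (lines : List String) (i : Nat) (cs : List (String → String → Bool)) (p : Int) (k : Nat)
    (h : pvHAux lines i cs p = some k) : 0 ≤ p ∧ p < (lines.length : Int) := by
  unfold pvHAux at h
  split at h
  · assumption
  · simp at h

theorem pvFold_none_iff (h : Int → Option Nat) (ps : List Int) :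
    ∀ (b : Option (Nat × Int)), ps.foldl (pvGStep h) b = none ↔ b = none ∧ ∀ p ∈ ps, h p = none := by
  induction ps with
  | nil => intro b; simp
  | cons p ps ih =>
    intro b
    simp only [List.foldl_cons, ih, List.mem_cons]
    constructor
    · rintro ⟨hb, hall⟩
      unfold pvGStep at hb
      rcases hp : h p with _ | k
      · rw [hp] at hb
        exact ⟨hb, fun p' hp' => hp'.elim (fun e => e ▸ hp) (hall p')⟩
      · rw [hp] at hb
        rcases b with _ | ⟨bk, bp⟩ <;> simp at hb
        split at hb <;> simp at hb
    · rintro ⟨hb, hall⟩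
      subst hb
      have hp := hall p (Or.inl rfl)
      refine ⟨?_, fun p' hp' => hall p' (Or.inr hp')⟩
      unfold pvGStep; rw [hp]

theorem pvFold_congr (h₁ h₂ : Int → Option Nat) (ps : List Int) :
    ∀ (b : Option (Nat × Int)), (∀ p ∈ ps, h₁ p = h₂ p) →
      ps.foldl (pvGStep h₁) b = ps.foldl (pvGStep h₂) b := by
  induction ps with
  | nil => intro b _; rfl
  | cons p ps ih =>
    intro b hall
    simp only [List.foldl_cons]
    have hstep : pvGStep h₁ b p = pvGStep h₂ b p := by
      unfold pvGStep; rw [hall p (List.mem_cons_self)]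
    rw [hstep]
    exact ih _ (fun p' hp' => hall p' (List.mem_cons_of_mem _ hp'))

theorem pvFind_first (ps : List Int) (c : Int → Bool) (p₀ : Int) :
    ps.Pairwise (· < ·) → ps.find? c = some p₀ → ∀ p ∈ ps, c p = true → p₀ ≤ p := by
  induction ps with
  | nil => intro _ h; simp at h
  | cons q ps ih =>
    intro hpw hfind p hp hc
    rcases List.pairwise_cons.mp hpw with ⟨hlt, hpw'⟩
    by_cases hq : c q
    · rw [List.find?_cons_of_pos hq] at hfind
      obtain rfl : q = p₀ := by injection hfind
      rcases List.mem_cons.mp hp with rfl | hp'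
      · exact le_refl _
      · exact le_of_lt (hlt p hp')
    · rw [List.find?_cons_of_neg (by simpa using hq)] at hfind
      rcases List.mem_cons.mp hp with rfl | hp'
      · exact absurd hc hq
      · exact ih hpw' hfind p hp' hc

theorem pvFold_char (h : Int → Option Nat) (ps : List Int) :
    ∀ (b : Option (Nat × Int)), ps.Pairwise (· < ·) →
      (∀ q, b = some q → ∀ p' ∈ ps, q.2 < p') →
      ∀ (k : Nat) (p : Int), ps.foldl (pvGStep h) b = some (k, p) →
        ((b = some (k, p) ∨ (p ∈ ps ∧ h p = some k ∧ ∀ q, b = some q → k < q.1))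
         ∧ (∀ q, b = some q → k ≤ q.1)
         ∧ (∀ p' ∈ ps, ∀ k', h p' = some k' → k ≤ k')
         ∧ (∀ p' ∈ ps, h p' = some k → p ≤ p')) := by
  induction ps with
  | nil =>
    intro b _ _ k p hfold
    have hb : b = some (k, p) := hfold
    subst hb
    refine ⟨Or.inl rfl, ?_, by intro p' hp'; simp at hp', by intro p' hp'; simp at hp'⟩
    rintro q hq
    injection hq with e
    subst e
    exact le_refl _
  | cons p₁ ps ih =>
    intro b hpw hbpos k p hfold
    rcases List.pairwise_cons.mp hpw with ⟨hlt, hpw'⟩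
    simp only [List.foldl_cons] at hfold
    -- analyse the first step
    have hstep :
        (pvGStep h b p₁ = b ∧ (∀ k', h p₁ = some k' → ∃ bk bp, b = some (bk, bp) ∧ bk ≤ k'))
        ∨ (∃ k₁, h p₁ = some k₁ ∧ pvGStep h b p₁ = some (k₁, p₁)
             ∧ ∀ q, b = some q → k₁ < q.1) := by
      unfold pvGStep
      rcases hp₁ : h p₁ with _ | k₁
      · exact Or.inl ⟨rfl, by intro k' hk'; exact absurd hk' (by simp)⟩
      · rcases b with _ | ⟨bk, bp⟩
        · exact Or.inr ⟨k₁, rfl, rfl, by rintro q h'; exact absurd h' (by simp)⟩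
        · by_cases hklt : k₁ < bk
          · refine Or.inr ⟨k₁, rfl, by simp [hklt], ?_⟩
            rintro q h'; injection h' with e; subst e; exact hklt
          · refine Or.inl ⟨by simp [hklt], ?_⟩
            intro k' hk'; injection hk' with e; subst e
            exact ⟨bk, bp, rfl, by omega⟩
    rcases hstep with ⟨heq, hkeep⟩ | ⟨k₁, hp₁, heq, hnew⟩
    · -- step kept b
      rw [heq] at hfold
      have := ih b hpw' (fun q hq p' hp' => hbpos q hq p' (List.mem_cons_of_mem _ hp')) k p hfold
      rcases this with ⟨h1, h2, h3, h4⟩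
      refine ⟨?_, h2, ?_, ?_⟩
      · rcases h1 with h1 | ⟨hm, hh, hb⟩
        · exact Or.inl h1
        · exact Or.inr ⟨List.mem_cons_of_mem _ hm, hh, hb⟩
      · intro p' hp' k' hk'
        rcases List.mem_cons.mp hp' with rfl | hp''
        · obtain ⟨bk, bp, hb, hble⟩ := hkeep k' hk'
          have := h2 _ hb; simp at this; omega
        · exact h3 p' hp'' k' hk'
      · intro p' hp' hk'
        rcases List.mem_cons.mp hp' with rfl | hp''
        · -- h p₁ = some k, result key k; result is b or from ps
          rcases h1 with h1 | ⟨hm, hh, hb⟩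
          · exact le_of_lt (hbpos _ h1 p' (List.mem_cons_self))
          · obtain ⟨bk, bp, hbeq, hble⟩ := hkeep k hk'
            have := hb _ hbeq; simp at this; omega
        · exact h4 p' hp'' hk'
    · -- step replaced with (k₁, p₁)
      rw [heq] at hfold
      have hbpos' : ∀ q, (some (k₁, p₁) : Option (Nat × Int)) = some q → ∀ p' ∈ ps, q.2 < p' := by
        rintro q hq p' hp'; injection hq with e; subst e; exact hlt p' hp'
      have := ih (some (k₁, p₁)) hpw' hbpos' k p hfold
      rcases this with ⟨h1, h2, h3, h4⟩
      have hkk₁ : k ≤ k₁ := by have := h2 _ rfl; simpa using this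
      refine ⟨?_, ?_, ?_, ?_⟩
      · rcases h1 with h1 | ⟨hm, hh, hb⟩
        · obtain ⟨e1, e2⟩ := Prod.mk.inj (Option.some.inj h1)
          subst e1; subst e2
          exact Or.inr ⟨List.mem_cons_self, hp₁, hnew⟩
        · exact Or.inr ⟨List.mem_cons_of_mem _ hm, hh, fun q hq => lt_trans (hb _ rfl) (hnew q hq)⟩
      · intro q hq; exact le_trans hkk₁ (le_of_lt (hnew q hq))
      · intro p' hp' k' hk'
        rcases List.mem_cons.mp hp' with rfl | hp''
        · rw [hp₁] at hk'; injection hk' with e; subst e; exact hkk₁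
        · exact h3 p' hp'' k' hk'
      · intro p' hp' hk'
        rcases List.mem_cons.mp hp' with rfl | hp''
        · -- h p₁ = some k; result key k with k ≤ k₁; show p ≤ p₁
          rw [hp₁] at hk'
          have ek : k₁ = k := Option.some.inj hk'
          rcases h1 with h1 | ⟨hm, hh, hb⟩
          · have e2 := Prod.mk.inj (Option.some.inj h1)
            exact le_of_eq e2.2.symm
          · have := hb _ rfl
            omega
        · exact h4 p' hp'' hk'

theorem pvLoopA2_eq (lines : List String) (t : Int) (pat : String → Bool) (offs : List Int) :
    pvLoopA2 lines t pat offs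
      = ((offs.map (t + ·)).find? (fun p => decide (0 ≤ p) && decide (p < (lines.length : Int))
            && pat (PySem.List.pyGetD lines p ""))).map
          (fun p => if p + 1 ≤ (lines.length : Int) then p + 1 else (lines.length : Int)) := by
  induction offs with
  | nil => rfl
  | cons o rest ih =>
    simp only [List.map_cons]
    cases hc : (decide (0 ≤ t + o) && decide (t + o < (lines.length : Int))
        && pat (PySem.List.pyGetD lines (t + o) "")) with
    | false =>
      simp only [List.find?_cons, hc, pvLoopA2, Bool.false_eq_true, if_false]
      exact ih
    | true =>
      simp only [List.find?_cons, hc, pvLoopA2, if_true, Option.map_some]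

theorem pvForall₂_patterns :
    List.Forall₂ (fun pat c => ∀ line, pat line = c (PySem.Str.strip line) line) pvPatternsA pvChecksB := by
  unfold pvPatternsA pvChecksB
  exact .cons (fun _ => rfl) (.cons (fun _ => rfl) (.cons (fun _ => rfl) (.cons (fun _ => rfl)
    (.cons (fun _ => rfl) (.cons (fun _ => rfl) (.cons (fun _ => rfl) (.cons (fun _ => rfl)
    (.cons (fun _ => rfl) .nil))))))))

theorem pvMain (lines : List String) (t : Int) (pa : List (String → Bool)) (cs : List (String → String → Bool))
    (hF : List.Forall₂ (fun pat c => ∀ line, pat line = c (PySem.Str.strip line) line) pa cs) :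
    ∀ (i : Nat) (offs : List Int), offs.Pairwise (· < ·) →
      pvLoopA1 lines t offs pa
        = ((offs.map (t + ·)).foldl (pvGStep (pvHAux lines i cs)) none).map
            (fun q => if q.2 + 1 ≤ (lines.length : Int) then q.2 + 1 else (lines.length : Int)) := by
  induction hF with
  | nil =>
    intro i offs _
    have hnone : (offs.map (t + ·)).foldl (pvGStep (pvHAux lines i [])) none = none := by
      rw [pvFold_none_iff]
      refine ⟨rfl, fun p _ => ?_⟩
      unfold pvHAux pvMatchIdxAux
      split <;> rfl
    rw [hnone]; rfl
  | @cons pat c pa' cs' hR hF' ih =>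
    intro i offs hpw
    have hps : (offs.map (t + ·)).Pairwise (· < ·) :=
      hpw.map _ (fun a b hab => by simpa using by omega)
    simp only [pvLoopA1]
    rw [pvLoopA2_eq]
    cases hfind : (offs.map (t + ·)).find? (fun p => decide (0 ≤ p) && decide (p < (lines.length : Int))
        && pat (PySem.List.pyGetD lines p "")) with
    | none =>
      simp only [Option.map_none]
      have hnot := List.find?_eq_none.mp hfind
      have hcong : ∀ p ∈ offs.map (t + ·), pvHAux lines i (c :: cs') p = pvHAux lines (i + 1) cs' p := by
        intro p hp
        have hc := hnot p hp
        unfold pvHAux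
        by_cases hv : 0 ≤ p ∧ p < (lines.length : Int)
        · rw [if_pos hv, if_pos hv]
          have hpat : pat (PySem.List.pyGetD lines p "") = false := by
            rcases hv with ⟨hv1, hv2⟩
            simpa [hv1, hv2] using hc
          have hcsf : c (PySem.Str.strip (PySem.List.pyGetD lines p ""))
              (PySem.List.pyGetD lines p "") = false := by
            rw [← hR]; exact hpat
          simp [pvMatchIdxAux, hcsf]
        · rw [if_neg hv, if_neg hv]
      rw [pvFold_congr _ _ _ none hcong]
      exact ih (i + 1) offs hpw
    | some p₀ =>
      have hmem := List.mem_of_find?_eq_some hfind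
      have hcp : (decide (0 ≤ p₀) && decide (p₀ < (lines.length : Int))
          && pat (PySem.List.pyGetD lines p₀ "")) = true := by
        simpa using List.find?_some hfind
      have hcp2 := hcp
      simp only [Bool.and_eq_true, decide_eq_true_eq] at hcp2
      have hvalid : 0 ≤ p₀ ∧ p₀ < (lines.length : Int) := ⟨hcp2.1.1, hcp2.1.2⟩
      have hpat : pat (PySem.List.pyGetD lines p₀ "") = true := hcp2.2
      have hh0 : pvHAux lines i (c :: cs') p₀ = some i := by
        unfold pvHAux
        rw [if_pos hvalid]
        have : c (PySem.Str.strip (PySem.List.pyGetD lines p₀ ""))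
            (PySem.List.pyGetD lines p₀ "") = true := by rw [← hR]; exact hpat
        simp [pvMatchIdxAux, this]
      cases hfold : (offs.map (t + ·)).foldl (pvGStep (pvHAux lines i (c :: cs'))) none with
      | none =>
        exfalso
        have := (pvFold_none_iff _ _ none).mp hfold
        exact absurd (this.2 p₀ hmem) (by rw [hh0]; simp)
      | some q =>
        obtain ⟨k, p⟩ := q
        obtain ⟨h1, _h2, h3, h4⟩ := pvFold_char _ _ none hps
          (by intro q hq; simp at hq) k p hfold
        rcases h1 with h1 | ⟨hm, hh, _⟩
        · simp at h1
        have hki : k = i := le_antisymm (h3 p₀ hmem i hh0) (pvHAux_le _ _ _ _ _ hh)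
        subst hki
        have hv' := pvHAux_valid _ _ _ _ _ hh
        have hcp' : (decide (0 ≤ p) && decide (p < (lines.length : Int))
            && pat (PySem.List.pyGetD lines p "")) = true := by
          unfold pvHAux at hh
          rw [if_pos hv'] at hh
          by_cases hcs : c (PySem.Str.strip (PySem.List.pyGetD lines p ""))
              (PySem.List.pyGetD lines p "") = true
          · have : pat (PySem.List.pyGetD lines p "") = true := by rw [hR]; exact hcs
            rcases hv' with ⟨hv1, hv2⟩
            simp [hv1, hv2, this]
          · exfalso
            simp only [pvMatchIdxAux, hcs, Bool.false_eq_true, if_false] at hh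
            have := pvMatchIdxAux_le _ _ _ _ _ hh
            omega
        have hpp : p = p₀ :=
          le_antisymm (h4 p₀ hmem hh0) (pvFind_first _ _ _ hps hfind p hm hcp')
        subst hpp
        simp


-- ===== VERDICT (by name: the statement is the Claim_ definition above) =====
theorem find_smart_boundary_py_spec : Claim_equal_find_smart_boundary_py := by
  intro lines t w _
  unfold Spec_find_smart_boundary_py find_smart_boundary_py find_smart_boundary_py_alt
  by_cases hg : (lines.length : Int) ≤ t
  · rw [if_pos hg, if_pos hg]
  · rw [if_neg hg, if_neg hg]
    have hpw : (PySem.List.pyRange (-w) (w + 1) 1).Pairwise (· < ·) :=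
      PySem.List.pairwise_lt_pyRange_one (-w) (w + 1)
    have hps : ((PySem.List.pyRange (-w) (w + 1) 1).map (t + ·)).Pairwise (· < ·) :=
      hpw.map _ (fun a b hab => by simpa using by omega)
    rw [pvFoldB_eq]
    rw [pvMain lines t pvPatternsA pvChecksB pvForall₂_patterns 0
      (PySem.List.pyRange (-w) (w + 1) 1) hpw]
    cases hfold : ((PySem.List.pyRange (-w) (w + 1) 1).map (t + ·)).foldl
        (pvGStep (pvHAux lines 0 pvChecksB)) none with
    | none => simp
    | some q =>
      obtain ⟨k, p⟩ := q
      obtain ⟨h1, _, _, _⟩ := pvFold_char _ _ none hps (by intro q hq; simp at hq) k p hfold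
      rcases h1 with h1 | ⟨_, hh, _⟩
      · simp at h1
      have hv := pvHAux_valid _ _ _ _ _ hh
      simp only [Option.map_some]
      rw [if_pos (by omega)]
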